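-- pv_equiv track=rewrite | github.com/YouAreGoodAtCoding/beginnercoding | python/mapitout.py | splitSentenceWithManySpaces
-- ===== SOURCE A (Python) =====
-- def splitSentenceWithManySpaces(input: str):
--     temp_char_arr = []
--     result_str_arr = []
--     for c in input:
--         # we capture only valid characters we care about, ignoring punctuations.
--         if (c.isalpha()):
--             temp_char_arr.append(c)
--         elif (c.isspace()):
--             # we flush out only on the first space. remaining spaces are ignored.
--             if (len(temp_char_arr) != 0):
--                 result_str_arr.append(''.join(temp_char_arr))
--                 temp_char_arr = []
--
--     # need to flush out the chars at the end.
--     if (len(temp_char_arr) != 0):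
--         result_str_arr.append(''.join(temp_char_arr))
--         temp_char_arr = []
--     return result_str_arr
-- ===== SOURCE B (Python) =====
-- def splitSentenceWithManySpaces(input: str):
--     # split-then-filter: tokenize on whitespace runs with split(), keep only letters of each token
--     words = [''.join(c for c in tok if c.isalpha()) for tok in input.split()]
--     return [w for w in words if w]
-- ===== Notes on version B (the rewrite author's own statement) =====
-- stated objective: idiomatic
-- what changed: Replaces the char-by-char flush-on-space state machine with a split()-then-filter decomposition: tokenize on whitespace runs, strip non-alpha characters from each token, drop empty results.
import Mathlib
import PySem

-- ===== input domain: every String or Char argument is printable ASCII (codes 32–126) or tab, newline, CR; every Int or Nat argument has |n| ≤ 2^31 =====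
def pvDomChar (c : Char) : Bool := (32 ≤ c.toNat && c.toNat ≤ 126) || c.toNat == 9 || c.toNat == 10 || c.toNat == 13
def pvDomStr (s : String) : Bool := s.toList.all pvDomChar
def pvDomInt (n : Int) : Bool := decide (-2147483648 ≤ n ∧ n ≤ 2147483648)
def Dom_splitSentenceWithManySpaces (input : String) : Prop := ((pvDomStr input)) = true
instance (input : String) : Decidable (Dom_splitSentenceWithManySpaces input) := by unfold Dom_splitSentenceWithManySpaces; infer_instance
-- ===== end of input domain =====

-- B replaces A's char-by-char flush-on-space state machine by an idiomatic split()-then-filter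
-- decomposition (same cost); proved to return the same list on every input.


-- ===== PORT A =====
-- the for-loop over the characters with state (temp_char_arr, result_str_arr)
def splitGoA : List Char → List Char → List String → List String
  | [], temp, res =>
      -- final flush: need to flush out the chars at the end
      if temp.length ≠ 0 then res ++ [String.ofList temp] else res
  | c :: cs, temp, res =>
      if PySem.Chars.isalpha c then splitGoA cs (temp ++ [c]) res
      else if PySem.Chars.isspace c then
        if temp.length ≠ 0 then splitGoA cs [] (res ++ [String.ofList temp])
        else splitGoA cs temp res
      else splitGoA cs temp res

def splitSentenceWithManySpaces (input : String) : List String :=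
  splitGoA input.toList [] []

-- ===== PORT B =====
def splitSentenceWithManySpaces_alt (input : String) : List String :=
  let words := (PySem.Str.split₀ input).map
    (fun tok => String.ofList (tok.toList.filter (fun c => PySem.Chars.isalpha c)))
  words.filter (fun w => w ≠ "")

-- ===== PRECONDITION & SPEC =====
def Spec_splitSentenceWithManySpaces (input : String) (out : List String) : Prop := out = splitSentenceWithManySpaces_alt input
instance (input : String) (out : List String) : Decidable (Spec_splitSentenceWithManySpaces input out) := by unfold Spec_splitSentenceWithManySpaces; infer_instance

-- ===== CLAIM (what is proved, stated in full; the proofs are below) =====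
def Claim_equal_splitSentenceWithManySpaces : Prop := ∀ (input : String), Dom_splitSentenceWithManySpaces input → Spec_splitSentenceWithManySpaces input (splitSentenceWithManySpaces input)

-- ===== LEMMAS AND PROOFS =====

-- Letters are never whitespace (both are numeric range tests on the code point).
theorem pvAlphaNotSpace (c : Char) (h : PySem.Chars.isalpha c = true) :
    PySem.Chars.isspace c = false := by
  simp only [PySem.Chars.isalpha, PySem.Chars.isupper, PySem.Chars.islower, Bool.or_eq_true,
    Bool.and_eq_true, decide_eq_true_eq, Char.le_def, UInt32.le_iff_toNat_le] at h
  simp only [PySem.Chars.isspace, Bool.or_eq_false_iff, Bool.and_eq_false_iff,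
    decide_eq_false_iff_not, Char.toNat]
  have hA : 'A'.val.toNat = 65 := rfl
  have hZ : 'Z'.val.toNat = 90 := rfl
  have ha : 'a'.val.toNat = 97 := rfl
  have hz : 'z'.val.toNat = 122 := rfl
  omega

-- B's per-token post-processing, on the List Char level.
def pvPost (ws : List (List Char)) : List String :=
  ((ws.map (fun t => t.filter (fun c => PySem.Chars.isalpha c))).filter
    (fun t => !t.isEmpty)).map String.ofList

theorem pvPost_append (xs ys : List (List Char)) :
    pvPost (xs ++ ys) = pvPost xs ++ pvPost ys := by
  simp [pvPost]

-- split₀.go with a non-empty accumulator just prepends the already-finished words.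
theorem pvGo_acc (cs cur : List Char) (acc : List (List Char)) :
    PySem.Chars.split₀.go cs cur acc = acc.reverse ++ PySem.Chars.split₀.go cs cur [] := by
  induction cs generalizing cur acc with
  | nil =>
      simp only [PySem.Chars.split₀.go]
      by_cases h : cur.isEmpty <;> simp [h]
  | cons c cs ih =>
      simp only [PySem.Chars.split₀.go]
      by_cases hs : PySem.Chars.isspace c <;> by_cases he : cur.isEmpty <;>
        simp [hs, he]
      · exact ih [] acc
      · rw [ih [] (cur.reverse :: acc), ih [] [cur.reverse]]; simp
      · exact ih (c :: cur) acc
      · exact ih (c :: cur) acc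

-- Main invariant: A's loop, started with the alpha-filtered in-progress word, computes
-- res ++ (B's post-processing of the remaining whitespace-split words).
theorem pvMain (cs cur : List Char) (res : List String) :
    splitGoA cs ((cur.filter (fun c => PySem.Chars.isalpha c)).reverse) res
      = res ++ pvPost (PySem.Chars.split₀.go cs cur []) := by
  induction cs generalizing cur res with
  | nil =>
      simp only [splitGoA, PySem.Chars.split₀.go]
      by_cases hc : cur.isEmpty
      · simp_all [pvPost, List.isEmpty_iff]
      · simp only [hc]
        by_cases hf : (cur.filter (fun c => PySem.Chars.isalpha c)) = []
        · simp [hf, pvPost, List.filter_reverse]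
        · simp [pvPost, List.filter_reverse, List.length_eq_zero_iff, hf]
  | cons c cs ih =>
      simp only [splitGoA, PySem.Chars.split₀.go]
      by_cases ha : PySem.Chars.isalpha c
      · have hs := pvAlphaNotSpace c ha
        simp only [ha, if_true, hs, Bool.false_eq_true, if_false]
        have : (cur.filter (fun c => PySem.Chars.isalpha c)).reverse ++ [c]
            = (((c :: cur).filter (fun c => PySem.Chars.isalpha c)).reverse) := by
          simp [ha]
        rw [this, ih (c :: cur) res]
      · by_cases hs : PySem.Chars.isspace c
        · simp only [ha, Bool.false_eq_true, if_false, hs, if_true]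
          by_cases he : cur.isEmpty
          · have hcur : cur = [] := List.isEmpty_iff.mp he
            subst hcur
            simp only [List.filter_nil, List.reverse_nil, List.length_nil, ne_eq,
              not_true_eq_false, if_false, he, if_true]
            exact ih [] res
          · simp only [he, Bool.false_eq_true, if_false]
            rw [pvGo_acc cs [] [cur.reverse]]
            by_cases hf : (cur.filter (fun c => PySem.Chars.isalpha c)) = []
            · have : pvPost [cur.reverse] = [] := by
                simp [pvPost, List.filter_reverse, hf]
              simp only [hf, List.reverse_nil, List.length_nil, ne_eq, not_true_eq_false,
                if_false]
              have ih0 := ih [] res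
              simp only [List.filter_nil, List.reverse_nil] at ih0
              rw [ih0]
              simp only [List.append_cancel_left_eq]
              rw [List.reverse_singleton, pvPost_append, this]
              simp
            · have hlen : ((cur.filter (fun c => PySem.Chars.isalpha c)).reverse).length ≠ 0 := by
                simp [List.length_eq_zero_iff, hf]
              simp only [ne_eq, hlen, not_false_eq_true, if_true]
              have hpost : pvPost [cur.reverse]
                  = [String.ofList ((cur.filter (fun c => PySem.Chars.isalpha c)).reverse)] := by
                simp [pvPost, List.filter_reverse, hf]
              have ih0 := ih []
                (res ++ [String.ofList ((cur.filter (fun c => PySem.Chars.isalpha c)).reverse)])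
              simp only [List.filter_nil, List.reverse_nil] at ih0
              rw [ih0]
              simp only [List.append_assoc, List.singleton_append, List.append_cancel_left_eq]
              rw [List.reverse_singleton, pvPost_append, hpost]
              simp
        · simp only [ha, Bool.false_eq_true, if_false, hs, if_false]
          have : (cur.filter (fun c => PySem.Chars.isalpha c))
              = ((c :: cur).filter (fun c => PySem.Chars.isalpha c)) := by
            simp [ha]
          rw [this, ih (c :: cur) res]

-- B's value is exactly pvPost of Python's split() word list.
theorem pvAlt_eq (input : String) :
    splitSentenceWithManySpaces_alt input = pvPost (PySem.Chars.split₀ input.toList) := by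
  simp only [splitSentenceWithManySpaces_alt, PySem.Str.split₀, pvPost,
    List.map_map, List.filter_map, Function.comp_def, String.toList_ofList]
  congr 1
  apply List.filter_congr
  intro t _
  rw [Bool.eq_iff_iff]
  simp [String.ofList_eq_empty_iff, List.filter_eq_nil_iff]

-- ===== VERDICT (by name: the statement is the Claim_ definition above) =====
theorem splitSentenceWithManySpaces_spec : Claim_equal_splitSentenceWithManySpaces := by
  intro input _
  unfold Spec_splitSentenceWithManySpaces splitSentenceWithManySpaces
  rw [pvAlt_eq, PySem.Chars.split₀,
    show ([] : List Char) = (([] : List Char).filter (fun c => PySem.Chars.isalpha c)).reverse from rfl,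
    pvMain input.toList [] []]
  simp
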